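-- pv_equiv track=rewrite | github.com/petromoldovan/dga-detector | models/feature_extraction.py | count_max_consecutive_characters_in_scope
-- ===== SOURCE A (Python) =====
-- def count_max_consecutive_characters_in_scope(domain, scope):
--     results = [0]
--
--     for letter in domain:
--         if letter in scope:
--             # update last item
--             results[-1] += 1
--         else:
--             # add new last item
--             results.append(0)
--
--     return max(results)
-- ===== SOURCE B (Python) =====
-- def count_max_consecutive_characters_in_scope(domain, scope):
--     # Gap-between-delimiters algorithm: record the positions of the out-of-scope
--     # characters (with sentinels -1 and len(domain)); each maximal run of in-scope
--     # characters is exactly the stretch between two consecutive break positions,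
--     # so the answer is the maximum of b - a - 1 over consecutive breaks a, b.
--     breaks = [-1]
--     for i, ch in enumerate(domain):
--         if ch not in scope:
--             breaks.append(i)
--     breaks.append(len(domain))
--     return max(b - a - 1 for a, b in zip(breaks, breaks[1:]))
-- ===== Notes on version B (the rewrite author's own statement) =====
-- stated objective: alternative
-- what changed: Replaces A's run-length bookkeeping (a list of run lengths mutated in place and reduced with max) by a delimiter-position algorithm: collect the indices of out-of-scope characters with sentinels -1 and len(domain), then take the maximum gap b-a-1 over consecutive break positions.
import Mathlib
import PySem

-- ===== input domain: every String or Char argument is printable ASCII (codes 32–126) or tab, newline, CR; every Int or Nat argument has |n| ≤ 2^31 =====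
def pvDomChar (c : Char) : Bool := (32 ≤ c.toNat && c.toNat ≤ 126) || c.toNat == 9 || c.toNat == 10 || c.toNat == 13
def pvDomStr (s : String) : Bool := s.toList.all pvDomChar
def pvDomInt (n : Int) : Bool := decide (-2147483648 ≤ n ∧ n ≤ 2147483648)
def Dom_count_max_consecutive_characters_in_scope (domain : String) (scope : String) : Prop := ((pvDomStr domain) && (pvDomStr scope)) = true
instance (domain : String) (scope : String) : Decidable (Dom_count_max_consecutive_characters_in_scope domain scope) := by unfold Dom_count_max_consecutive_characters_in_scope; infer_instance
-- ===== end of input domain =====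

-- B replaces A's run-length list by a delimiter-position algorithm: it records the
-- indices of out-of-scope characters (sentinels -1 and len(domain)) and returns the
-- maximum gap b - a - 1 between consecutive break positions (objective: alternative).

-- ===== PORT A =====
-- A: results = [0]; for letter in domain: if letter in scope: results[-1] += 1 else: results.append(0); return max(results)
def count_max_consecutive_characters_in_scope (domain : String) (scope : String) : Int :=
  let results := domain.toList.foldl
    (fun results letter =>
      if PySem.Chars.isIn [letter] scope.toList then
        -- results[-1] += 1
        PySem.List.pySetD results (-1) (PySem.List.pyGetD results (-1) 0 + 1)
      else
        results ++ [0])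
    [0]
  (PySem.List.max? results (fun y => y)).getD 0  -- max(results); results is never empty

-- ===== PORT B =====
-- breaks = [-1]; for i, ch in enumerate(domain): if ch not in scope: breaks.append(i);
-- breaks.append(len(domain)); return max(b - a - 1 for a, b in zip(breaks, breaks[1:]))
def count_max_consecutive_characters_in_scope_alt (domain : String) (scope : String) : Int :=
  let breaks := (PySem.List.enumerate domain.toList 0).foldl
    (fun bs p => if PySem.Chars.isIn [p.2] scope.toList then bs else bs ++ [p.1])
    [(-1 : Int)]
  let breaks := breaks ++ [(domain.toList.length : Int)]
  -- breaks[1:] = breaks.tail (drop of a nonnegative literal index: exact);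
  -- max(<generator>) over the gap list; the list is never empty (breaks has ≥ 2 elements)
  (PySem.List.max? ((breaks.zip breaks.tail).map (fun p => p.2 - p.1 - 1)) (fun y => y)).getD 0

-- ===== PRECONDITION & SPEC =====
def Spec_count_max_consecutive_characters_in_scope (domain : String) (scope : String) (out : Int) : Prop := out = count_max_consecutive_characters_in_scope_alt domain scope
instance (domain : String) (scope : String) (out : Int) : Decidable (Spec_count_max_consecutive_characters_in_scope domain scope out) := by unfold Spec_count_max_consecutive_characters_in_scope; infer_instance

-- ===== CLAIM (what is proved, stated in full; the proofs are below) =====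
def Claim_equal_count_max_consecutive_characters_in_scope : Prop := ∀ (domain : String) (scope : String), Dom_count_max_consecutive_characters_in_scope domain scope → Spec_count_max_consecutive_characters_in_scope domain scope (count_max_consecutive_characters_in_scope domain scope)

-- ===== LEMMAS AND PROOFS =====

-- the gap list of a break list (B's zip-map expression, named for the proofs)
def pvGaps (bs : List Int) : List Int := (bs.zip bs.tail).map (fun p => p.2 - p.1 - 1)

theorem pvGaps_cons_cons (a b : Int) (t : List Int) :
    pvGaps (a :: b :: t) = (b - a - 1) :: pvGaps (b :: t) := rfl

-- appending a new break y after last break b appends one gap y - b - 1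
theorem pvGaps_append (bs : List Int) (b y : Int) :
    pvGaps ((bs ++ [b]) ++ [y]) = pvGaps (bs ++ [b]) ++ [y - b - 1] := by
  induction bs with
  | nil => rfl
  | cons a t ih =>
    cases t with
    | nil => rfl
    | cons c t' =>
      simpa [pvGaps_cons_cons] using ih

-- results[-1] += 1 on a list of shape ys ++ [y]
theorem pySetD_inc_last (ys : List Int) (y v : Int) :
    PySem.List.pySetD (ys ++ [y]) (-1) v = ys ++ [v] := by
  induction ys with
  | nil => rfl
  | cons a t ih =>
    simp [PySem.List.pySetD, PySem.List.pySet?, PySem.List.pyIdx?] at ih ⊢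
    try omega

-- joint invariant: A's run-length list IS the gap list of B's break list (plus the
-- moving right sentinel i + cs.length)
theorem pv_inv (scope : List Char) (cs : List Char) :
    ∀ (i : Int) (bs : List Int) (b : Int),
    cs.foldl
      (fun results letter =>
        if PySem.Chars.isIn [letter] scope then
          PySem.List.pySetD results (-1) (PySem.List.pyGetD results (-1) 0 + 1)
        else results ++ [0])
      (pvGaps ((bs ++ [b]) ++ [i]))
    = pvGaps
        (((PySem.List.enumerate cs i).foldl
            (fun bs p => if PySem.Chars.isIn [p.2] scope then bs else bs ++ [p.1])
            (bs ++ [b])) ++ [i + cs.length]) := by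
  induction cs with
  | nil => intro i bs b; simp [PySem.List.enumerate]
  | cons c cs ih =>
    intro i bs b
    rw [PySem.List.enumerate_cons]
    by_cases h : PySem.Chars.isIn [c] scope = true
    · have hA : PySem.List.pySetD (pvGaps ((bs ++ [b]) ++ [i])) (-1)
          (PySem.List.pyGetD (pvGaps ((bs ++ [b]) ++ [i])) (-1) 0 + 1)
          = pvGaps ((bs ++ [b]) ++ [i + 1]) := by
        rw [pvGaps_append, pvGaps_append, PySem.List.pyGetD_neg_one_append_singleton,
          pySetD_inc_last]
        ring_nf
      simp only [List.foldl_cons, h, if_true, hA, List.length_cons, Nat.cast_add,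
        Nat.cast_one]
      rw [show i + ((cs.length : Int) + 1) = i + 1 + (cs.length : Int) from by ring]
      exact ih (i + 1) bs b
    · have hA : pvGaps ((bs ++ [b]) ++ [i]) ++ [0]
          = pvGaps (((bs ++ [b]) ++ [i]) ++ [i + 1]) := by
        rw [pvGaps_append (bs ++ [b]) i (i + 1)]
        norm_num
      simp only [List.foldl_cons, h, Bool.false_eq_true, if_false, hA,
        List.length_cons, Nat.cast_add, Nat.cast_one]
      rw [show i + ((cs.length : Int) + 1) = i + 1 + (cs.length : Int) from by ring]
      exact ih (i + 1) (bs ++ [b]) i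

-- ===== VERDICT (by name: the statement is the Claim_ definition above) =====
theorem count_max_consecutive_characters_in_scope_spec : Claim_equal_count_max_consecutive_characters_in_scope := by
  intro domain scope _
  unfold Spec_count_max_consecutive_characters_in_scope
  unfold count_max_consecutive_characters_in_scope count_max_consecutive_characters_in_scope_alt
  have h := pv_inv scope.toList domain.toList 0 [] (-1)
  simp only [List.nil_append] at h
  have h0 : pvGaps ([(-1 : Int)] ++ [(0 : Int)]) = [0] := rfl
  rw [h0] at h
  simp only [h, zero_add]
  rfl
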